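-- pv_equiv track=rewrite | github.com/kunal768/Interviewbit | Heaps and Maps/Profit Maximisation.py | solve
-- ===== SOURCE A (Python) =====
-- from heapq import heappush,heappop
--
-- def solve(A, B):
--     pq = []
--     for i in A :
--         heappush(pq,-i)
--     ans = 0
--     while B :
--         temp = -heappop(pq)
--         heappush(pq,-temp+1)
--         ans += temp
--         B -= 1
--     return ans
-- ===== SOURCE B (Python) =====
-- def _cnt(A, t):
--     # number of picks with value > t available across all decrement chains
--     return sum(x - t for x in A if x > t)
--
-- def _tri(x):
--     return x * (x + 1) // 2
--
-- def solve(A, B):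
--     if B == 0:
--         return 0
--     hi = max(A)          # cnt(hi) == 0 <= B
--     lo = hi - B - 1      # cnt(lo) >= hi - lo = B + 1 > B
--     while hi - lo > 1:   # binary search for the smallest t with cnt(t) <= B
--         mid = (lo + hi) // 2
--         if _cnt(A, mid) <= B:
--             hi = mid
--         else:
--             lo = mid
--     t = hi
--     total = sum(_tri(x) - _tri(t) for x in A if x > t)  # all picks with value > t
--     return total + (B - _cnt(A, t)) * t                 # remaining picks at value t
-- ===== Notes on version B (the rewrite author's own statement) =====
-- stated objective: alternative
-- what changed: Replaces the heap simulation (pop the max, add it, push max-1, B times) by a binary search for the smallest price threshold t with at most B picks above it, then a closed-form triangular-number sum of every value's decrement chain down to t plus the leftover picks at t.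
import Mathlib
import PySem

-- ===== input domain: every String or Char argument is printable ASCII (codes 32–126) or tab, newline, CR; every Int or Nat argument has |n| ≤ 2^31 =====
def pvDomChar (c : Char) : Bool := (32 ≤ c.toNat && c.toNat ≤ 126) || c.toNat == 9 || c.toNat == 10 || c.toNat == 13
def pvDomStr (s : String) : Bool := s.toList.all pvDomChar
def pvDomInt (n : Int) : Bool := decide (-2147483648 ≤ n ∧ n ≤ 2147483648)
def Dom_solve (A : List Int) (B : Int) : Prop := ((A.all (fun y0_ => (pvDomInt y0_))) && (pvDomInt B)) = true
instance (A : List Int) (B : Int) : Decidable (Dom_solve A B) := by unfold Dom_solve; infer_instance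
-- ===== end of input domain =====

-- B replaces A's heap simulation (pop the max, add it, push max-1, B times) by a binary search
-- on the price threshold with a closed-form sum of each value's decrement chain (objective:
-- alternative — a different algorithm; a timing run did not confirm it measurably faster here).

-- ===== PORT A =====
-- heapq.heappush / heappop are library calls; they are ported by their contract: the heap is a
-- multiset of Ints (a List), heappush adds an element, heappop removes and returns the minimum
-- (exact for Int elements, which are indistinguishable when equal).
-- Python's 'while B: … B -= 1' runs B times for B ≥ 0 and diverges for B < 0 (excluded by Pre_).
def solveLoopA : Nat → List Int → Int → Int
  | 0, _, ans => ans
  | Nat.succ b, pq, ans =>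
    match PySem.List.min? pq (fun x => x) with
    | none => ans          -- heappop([]) raises IndexError; excluded by Pre_solve
    | some μ =>
      let temp := -μ
      solveLoopA b ((-temp + 1) :: pq.erase μ) (ans + temp)

def solve (A : List Int) (B : Int) : Int :=
  let pq := A.foldl (fun pq i => (-i) :: pq) []
  solveLoopA B.toNat pq 0

-- ===== PORT B =====
def cntB (A : List Int) (t : Int) : Int :=
  ((A.filter (fun x => t < x)).map (fun x => x - t)).sum

def triB (x : Int) : Int := PySem.Int.floordiv (x * (x + 1)) 2

-- the while-loop, with fuel = the interval length (each pass shrinks the interval by ≥ 1,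
-- so the guard 1 < hi - lo, checked exactly as in Python, always stops it first)
def bsearchGo (A : List Int) (B : Int) : Nat → Int → Int → Int
  | 0, _, hi => hi
  | fuel + 1, lo, hi =>
    if 1 < hi - lo then
      let mid := PySem.Int.floordiv (lo + hi) 2
      if cntB A mid ≤ B then bsearchGo A B fuel lo mid else bsearchGo A B fuel mid hi
    else hi

def bsearchB (A : List Int) (B lo hi : Int) : Int := bsearchGo A B (hi - lo).toNat lo hi

def solve_alt (A : List Int) (B : Int) : Int :=
  if B = 0 then 0
  else
    match PySem.List.max? A (fun x => x) with
    | none => 0            -- max([]) raises ValueError; excluded by Pre_solve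
    | some hi =>
      let t := bsearchB A B (hi - B - 1) hi
      ((A.filter (fun x => t < x)).map (fun x => triB x - triB t)).sum + (B - cntB A t) * t

-- ===== PRECONDITION & SPEC =====
-- A diverges for B < 0 ('while B' with a negative counter) and raises IndexError when B ≠ 0 and
-- the heap is empty; Pre_ excludes exactly those inputs.
def Pre_solve (A : List Int) (B : Int) : Prop := 0 ≤ B ∧ (B = 0 ∨ A ≠ [])
instance (A : List Int) (B : Int) : Decidable (Pre_solve A B) := by unfold Pre_solve; infer_instance
def pvWitness_solve : List Int × Int := ([3, 1, 2], 4)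

def Spec_solve (A : List Int) (B : Int) (out : Int) : Prop := out = solve_alt A B
instance (A : List Int) (B : Int) (out : Int) : Decidable (Spec_solve A B out) := by unfold Spec_solve; infer_instance

-- ===== CLAIM (what is proved, stated in full; the proofs are below) =====
def Claim_equal_solve : Prop := ∀ (A : List Int) (B : Int), Dom_solve A B → Pre_solve A B → Spec_solve A B (solve A B)

-- ===== LEMMAS AND PROOFS =====

-- mathematical count / sum of the picks above a threshold, over the list of (positive) values
def mcnt (V : List Int) (t : Int) : Int := (V.map (fun v => max 0 (v - t))).sum
def mS (V : List Int) (t : Int) : Int := (V.map (fun v => if t < v then triB v - triB t else 0)).sum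

theorem two_triB (x : Int) : 2 * triB x = x * (x + 1) := by
  obtain ⟨k, hk⟩ := Int.even_mul_succ_self x
  unfold triB
  rw [PySem.Int.floordiv_eq_ediv_of_pos (by omega), hk]
  omega

theorem triB_sub (m : Int) : triB m - triB (m - 1) = m := by
  have h1 := two_triB m
  have h2 := two_triB (m - 1)
  have h3 : m * (m + 1) - (m - 1) * (m - 1 + 1) = 2 * m := by ring
  linarith

theorem mcnt_cons (v : Int) (V : List Int) (t : Int) :
    mcnt (v :: V) t = max 0 (v - t) + mcnt V t := by simp [mcnt]

theorem mS_cons (v : Int) (V : List Int) (t : Int) :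
    mS (v :: V) t = (if t < v then triB v - triB t else 0) + mS V t := by simp [mS]

theorem mcnt_perm {V W : List Int} (h : V.Perm W) (t : Int) : mcnt V t = mcnt W t :=
  (h.map _).sum_eq

theorem mS_perm {V W : List Int} (h : V.Perm W) (t : Int) : mS V t = mS W t :=
  (h.map _).sum_eq

theorem mcnt_nonneg (V : List Int) (t : Int) : 0 ≤ mcnt V t := by
  induction V with
  | nil => simp [mcnt]
  | cons v V ih => rw [mcnt_cons]; have := le_max_left 0 (v - t); omega

theorem mcnt_zero {V : List Int} {t : Int} (h : ∀ v ∈ V, v ≤ t) : mcnt V t = 0 := by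
  induction V with
  | nil => rfl
  | cons v V ih =>
    rw [mcnt_cons, ih (fun w hw => h w (List.mem_cons_of_mem _ hw))]
    have := h v (List.mem_cons_self ..)
    omega

theorem mS_zero {V : List Int} {t : Int} (h : ∀ v ∈ V, v ≤ t) : mS V t = 0 := by
  induction V with
  | nil => rfl
  | cons v V ih =>
    rw [mS_cons, ih (fun w hw => h w (List.mem_cons_of_mem _ hw))]
    have := h v (List.mem_cons_self ..)
    rw [if_neg (by omega)]
    omega

theorem le_mcnt_of_mem {V : List Int} {v t : Int} (h : v ∈ V) : max 0 (v - t) ≤ mcnt V t := by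
  rw [mcnt_perm (List.perm_cons_erase h) t, mcnt_cons]
  have := mcnt_nonneg (V.erase v) t
  omega

theorem exists_gt_of_mcnt_pos {V : List Int} {t : Int} (h : 0 < mcnt V t) : ∃ v ∈ V, t < v := by
  by_contra hc
  rw [mcnt_zero (fun v hv => le_of_not_gt (fun hgt => hc ⟨v, hv, hgt⟩))] at h
  omega

theorem cntB_eq_mcnt (A : List Int) (t : Int) : cntB A t = mcnt A t := by
  induction A with
  | nil => rfl
  | cons x A ih =>
    simp only [cntB, mcnt, List.filter_cons, List.map_cons, List.sum_cons,
      decide_eq_true_eq] at ih ⊢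
    split_ifs with hx
    · simp only [List.map_cons, List.sum_cons]
      omega
    · omega

theorem totalB_eq_mS (A : List Int) (t : Int) :
    ((A.filter (fun x => t < x)).map (fun x => triB x - triB t)).sum = mS A t := by
  induction A with
  | nil => rfl
  | cons x A ih =>
    simp only [mS, List.filter_cons, List.map_cons, List.sum_cons, decide_eq_true_eq] at ih ⊢
    split_ifs with hx
    · simp only [List.map_cons, List.sum_cons]
      omega
    · omega

-- the binary search returns the least threshold t with cntB A t ≤ B
theorem bsearchGo_spec (A : List Int) (B : Int) (fuel : Nat) :
    ∀ lo hi : Int, (hi - lo).toNat ≤ fuel → B < cntB A lo → cntB A hi ≤ B → lo < hi →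
    cntB A (bsearchGo A B fuel lo hi) ≤ B ∧ B < cntB A (bsearchGo A B fuel lo hi - 1) := by
  induction fuel with
  | zero => intro lo hi hf hlo hhi hlt; omega
  | succ fuel ih =>
    intro lo hi hf hlo hhi hlt
    rw [bsearchGo]
    by_cases h : 1 < hi - lo
    · rw [if_pos h]
      simp only
      have h1 : lo + 1 ≤ PySem.Int.floordiv (lo + hi) 2 :=
        (PySem.Int.le_floordiv_iff_mul_le (by omega)).2 (by omega)
      have h2 : PySem.Int.floordiv (lo + hi) 2 < hi :=
        (PySem.Int.floordiv_lt_iff_lt_mul (by omega)).2 (by omega)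
      split_ifs with hle
      · exact ih lo _ (by omega) hlo hle (by omega)
      · exact ih _ hi (by omega) (by omega) hhi (by omega)
    · rw [if_neg h]
      have heq : hi - 1 = lo := by omega
      rw [heq]
      exact ⟨hhi, hlo⟩

theorem bsearchB_spec (A : List Int) (B lo hi : Int) (hlo : B < cntB A lo)
    (hhi : cntB A hi ≤ B) (hlt : lo < hi) :
    cntB A (bsearchB A B lo hi) ≤ B ∧ B < cntB A (bsearchB A B lo hi - 1) :=
  bsearchGo_spec A B (hi - lo).toNat lo hi (le_refl _) hlo hhi hlt

-- one greedy step: replacing one maximum m of the multiset V by m - 1 keeps the threshold t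
-- good (for n instead of n+1) and lowers the closed form by exactly m
theorem step_good (V R : List Int) (m t n : Int)
    (hperm : V.Perm (m :: R)) (hmax : ∀ v ∈ V, v ≤ m) (hn : 0 ≤ n)
    (h1 : mcnt V t ≤ n + 1) (h2 : n + 1 < mcnt V (t - 1)) :
    mcnt ((m - 1) :: R) t ≤ n ∧ n < mcnt ((m - 1) :: R) (t - 1) ∧
    mS ((m - 1) :: R) t + (n - mcnt ((m - 1) :: R) t) * t
      = mS V t + (n + 1 - mcnt V t) * t - m := by
  have hVS : mS V t = (if t < m then triB m - triB t else 0) + mS R t := by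
    rw [mS_perm hperm, mS_cons]
  have hRmax : ∀ v ∈ R, v ≤ m := fun v hv => hmax v (hperm.mem_iff.2 (List.mem_cons_of_mem _ hv))
  have f1 : mcnt V t = max 0 (m - t) + mcnt R t := by rw [mcnt_perm hperm, mcnt_cons]
  have f2 : mcnt V (t - 1) = max 0 (m - (t - 1)) + mcnt R (t - 1) := by
    rw [mcnt_perm hperm, mcnt_cons]
  have htm : t ≤ m := by
    obtain ⟨v, hv, hvt⟩ := exists_gt_of_mcnt_pos (t := t - 1) (V := V) (by omega)
    have := hmax v hv
    omega
  rw [f1] at h1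
  rw [f2] at h2
  rw [mcnt_cons (m - 1) R t, mcnt_cons (m - 1) R (t - 1), mS_cons (m - 1) R t, hVS, f1]
  by_cases hcase : t = m
  · subst hcase
    have hR0 : mcnt R t = 0 := mcnt_zero hRmax
    have hRS : mS R t = 0 := mS_zero hRmax
    rw [if_neg (by omega : ¬ t < t - 1), if_neg (lt_irrefl t), hR0, hRS]
    refine ⟨by omega, by omega, ?_⟩
    have e1 : max 0 (t - 1 - t) = 0 := by omega
    have e2 : max 0 (t - t) = 0 := by omega
    rw [e1, e2]
    ring
  · have htm' : t < m := lt_of_le_of_ne htm hcase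
    have e1 : max 0 (m - t) = m - t := by omega
    have e2 : max 0 (m - 1 - t) = m - 1 - t := by omega
    have e4 : max 0 (m - 1 - (t - 1)) = m - t := by omega
    have eS : (if t < m - 1 then triB (m - 1) - triB t else 0) = triB (m - 1) - triB t := by
      by_cases h : t < m - 1
      · rw [if_pos h]
      · have hmt : m - 1 = t := by omega
        rw [if_neg h, hmt]
        omega
    have htri : triB m = triB (m - 1) + m := by have := triB_sub m; omega
    rw [if_pos htm', eS, e1, e2, e4, htri]
    refine ⟨by omega, by omega, by ring⟩

-- the greedy loop evaluated through any good threshold t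
theorem greedy_eq (n : Nat) : ∀ (pq : List Int) (ans t : Int), pq ≠ [] →
    mcnt (pq.map (fun p => -p)) t ≤ (n : Int) →
    (n : Int) < mcnt (pq.map (fun p => -p)) (t - 1) →
    solveLoopA n pq ans
      = ans + mS (pq.map (fun p => -p)) t + ((n : Int) - mcnt (pq.map (fun p => -p)) t) * t := by
  induction n with
  | zero =>
    intro pq ans t hne h1 h2
    have h0 : mcnt (pq.map (fun p => -p)) t = 0 := by
      have := mcnt_nonneg (pq.map (fun p => -p)) t
      omega
    have hall : ∀ v ∈ pq.map (fun p => -p), v ≤ t := by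
      intro v hv
      by_contra hc
      have := le_mcnt_of_mem (t := t) hv
      omega
    rw [mS_zero hall]
    simp [solveLoopA, h0]
  | succ n ih =>
    intro pq ans t hne h1 h2
    obtain ⟨μ, hμ⟩ : ∃ μ, PySem.List.min? pq (fun x => x) = some μ := by
      cases h : PySem.List.min? pq (fun x => x) with
      | none => exact absurd ((PySem.List.min?_eq_none_iff pq _).1 h) hne
      | some μ => exact ⟨μ, rfl⟩
    have hmem : μ ∈ pq := PySem.List.min?_mem hμ
    have hmin : ∀ p ∈ pq, μ ≤ p := PySem.List.min?_isMin hμ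
    have hperm : (pq.map (fun p => -p)).Perm ((-μ) :: (pq.erase μ).map (fun p => -p)) := by
      simpa using (List.perm_cons_erase hmem).map (fun p => -p)
    have hmax : ∀ v ∈ pq.map (fun p => -p), v ≤ -μ := by
      intro v hv
      obtain ⟨p, hp, rfl⟩ := List.mem_map.1 hv
      have := hmin p hp
      omega
    have hstep := step_good (pq.map (fun p => -p)) ((pq.erase μ).map (fun p => -p)) (-μ) t n
      hperm hmax (by positivity) (by push_cast at h1 ⊢; omega) (by push_cast at h2 ⊢; omega)
    have hmapeq : ((-(-μ) + 1) :: pq.erase μ).map (fun p => -p)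
        = (-μ - 1) :: (pq.erase μ).map (fun p => -p) := by
      simp only [List.map_cons]
      congr 1
      omega
    have := ih ((-(-μ) + 1) :: pq.erase μ) (ans + -μ) t (by simp)
      (by rw [hmapeq]; have := hstep.1; omega)
      (by rw [hmapeq]; have := hstep.2.1; omega)
    simp only [solveLoopA, hμ]
    rw [this, hmapeq]
    push_cast
    linarith [hstep.2.2]

theorem foldl_neg_cons (A acc : List Int) :
    A.foldl (fun pq i => (-i) :: pq) acc = (A.map (fun i => -i)).reverse ++ acc := by
  induction A generalizing acc with
  | nil => simp
  | cons x A ih => simp [List.foldl_cons, ih]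

theorem pq0_values_perm (A : List Int) :
    ((A.foldl (fun pq i => (-i) :: pq) []).map (fun p => -p)).Perm A := by
  rw [foldl_neg_cons]
  have : ((A.map (fun i => -i)).reverse ++ []).map (fun p => -p) = A.reverse := by
    simp [List.map_reverse, List.map_map]
  rw [this]
  exact List.reverse_perm A

-- ===== VERDICT (by name: the statement is the Claim_ definition above) =====
theorem solve_spec : Claim_equal_solve := by
  intro A B _ hpre
  obtain ⟨hB, hBA⟩ := hpre
  unfold Spec_solve
  by_cases hB0 : B = 0
  · subst hB0
    simp [solve, solve_alt, solveLoopA]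
  · have hA : A ≠ [] := by tauto
    have hB1 : 1 ≤ B := by omega
    obtain ⟨hi, hhi⟩ : ∃ hi, PySem.List.max? A (fun x => x) = some hi := by
      cases h : PySem.List.max? A (fun x => x) with
      | none => exact absurd ((PySem.List.max?_eq_none_iff A _).1 h) hA
      | some hi => exact ⟨hi, rfl⟩
    have hhimem : hi ∈ A := PySem.List.max?_mem hhi
    have hhimax : ∀ x ∈ A, x ≤ hi := PySem.List.max?_isMax hhi
    have hub : cntB A hi ≤ B := by
      rw [cntB_eq_mcnt, mcnt_zero hhimax]; omega
    have hlb : B < cntB A (hi - B - 1) := by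
      rw [cntB_eq_mcnt]
      have := le_mcnt_of_mem (t := hi - B - 1) hhimem
      omega
    have hgood := bsearchB_spec A B (hi - B - 1) hi hlb hub (by omega)
    rw [cntB_eq_mcnt, cntB_eq_mcnt] at hgood
    have hpq := pq0_values_perm A
    have hBt : ((B.toNat : Nat) : Int) = B := Int.toNat_of_nonneg hB
    have hg := greedy_eq B.toNat (A.foldl (fun pq i => (-i) :: pq) []) 0
      (bsearchB A B (hi - B - 1) hi)
      (by
        intro hnil
        rw [hnil] at hpq
        exact hA (List.Perm.nil_eq hpq).symm)
      (by rw [mcnt_perm hpq, hBt]; omega)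
      (by rw [mcnt_perm hpq, hBt]; omega)
    simp only [solve, solve_alt, if_neg hB0, hhi]
    rw [hg, mcnt_perm hpq, mS_perm hpq, totalB_eq_mS, cntB_eq_mcnt, hBt]
    ring
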